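-- pv_equiv track=rewrite | github.com/coultat/Python_Challenges | my_project/exercises/basics/maths/suma_estatistica_ii.py | calc_sum_and_count_all_numbers_div_by_2_or_7
-- ===== SOURCE A (Python) =====
-- def calc_sum_and_count_all_numbers_div_by_2_or_7(input_max):
--     assert isinstance(input_max, int), "parameter passed is not int"
--     counter = 1
--     divisible = set()
--     while counter < input_max:
--         if counter % 7 == 0 or counter % 2 == 0:
--             divisible.add(counter)
--         counter += 1
--     return len(divisible), sum(divisible)
-- ===== SOURCE B (Python) =====
-- def calc_sum_and_count_all_numbers_div_by_2_or_7(input_max):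
--     assert isinstance(input_max, int), "parameter passed is not int"
--     n = input_max - 1
--     if n < 1:
--         return 0, 0
--     c2, c7, c14 = n // 2, n // 7, n // 14
--     s2 = 2 * c2 * (c2 + 1) // 2
--     s7 = 7 * c7 * (c7 + 1) // 2
--     s14 = 14 * c14 * (c14 + 1) // 2
--     return c2 + c7 - c14, s2 + s7 - s14
-- ===== Notes on version B (the rewrite author's own statement) =====
-- stated objective: faster
-- what changed: Replaced the O(n) counting loop with O(1) inclusion-exclusion arithmetic-series formulas for multiples of 2, 7 and 14.
import Mathlib
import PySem

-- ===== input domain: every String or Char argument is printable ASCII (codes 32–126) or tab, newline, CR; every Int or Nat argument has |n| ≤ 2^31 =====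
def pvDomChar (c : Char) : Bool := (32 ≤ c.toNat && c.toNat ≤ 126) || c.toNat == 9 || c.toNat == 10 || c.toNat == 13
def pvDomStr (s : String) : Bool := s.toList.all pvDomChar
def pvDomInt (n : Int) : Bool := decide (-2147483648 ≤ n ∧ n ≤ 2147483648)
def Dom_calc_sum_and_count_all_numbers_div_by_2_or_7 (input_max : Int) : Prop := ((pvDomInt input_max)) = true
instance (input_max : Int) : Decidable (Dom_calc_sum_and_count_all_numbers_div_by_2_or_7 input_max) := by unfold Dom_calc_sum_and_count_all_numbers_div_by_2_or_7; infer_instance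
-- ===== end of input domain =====

-- B replaces A's O(n) counting loop by O(1) inclusion-exclusion arithmetic-series formulas (measurably faster, asymptotic change).

-- ===== PORT A =====
-- the `while counter < input_max` loop, carrying the `divisible` set
def pvLoopA (input_max counter : Int) (s : PySem.Set Int) : PySem.Set Int :=
  if counter < input_max then
    pvLoopA input_max (counter + 1)
      (if PySem.Int.mod counter 7 == 0 || PySem.Int.mod counter 2 == 0 then PySem.Set.add s counter else s)
  else s
termination_by (input_max - counter).toNat
decreasing_by omega

def calc_sum_and_count_all_numbers_div_by_2_or_7 (input_max : Int) : Int × Int :=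
  let divisible := pvLoopA input_max 1 PySem.Set.empty
  (PySem.Set.len divisible, divisible.sum)

-- ===== PORT B =====
def calc_sum_and_count_all_numbers_div_by_2_or_7_alt (input_max : Int) : Int × Int :=
  let n := input_max - 1
  if n < 1 then (0, 0)
  else
    let c2 := PySem.Int.floordiv n 2
    let c7 := PySem.Int.floordiv n 7
    let c14 := PySem.Int.floordiv n 14
    let s2 := PySem.Int.floordiv (2 * c2 * (c2 + 1)) 2
    let s7 := PySem.Int.floordiv (7 * c7 * (c7 + 1)) 2
    let s14 := PySem.Int.floordiv (14 * c14 * (c14 + 1)) 2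
    (c2 + c7 - c14, s2 + s7 - s14)

-- ===== PRECONDITION & SPEC =====
def Spec_calc_sum_and_count_all_numbers_div_by_2_or_7 (input_max : Int) (out : Int × Int) : Prop := out = calc_sum_and_count_all_numbers_div_by_2_or_7_alt input_max
instance (input_max : Int) (out : Int × Int) : Decidable (Spec_calc_sum_and_count_all_numbers_div_by_2_or_7 input_max out) := by unfold Spec_calc_sum_and_count_all_numbers_div_by_2_or_7; infer_instance

-- ===== CLAIM (what is proved, stated in full; the proofs are below) =====
def Claim_equal_calc_sum_and_count_all_numbers_div_by_2_or_7 : Prop := ∀ (input_max : Int), Dom_calc_sum_and_count_all_numbers_div_by_2_or_7 input_max → Spec_calc_sum_and_count_all_numbers_div_by_2_or_7 input_max (calc_sum_and_count_all_numbers_div_by_2_or_7 input_max)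

-- ===== LEMMAS AND PROOFS =====

-- one unfolding of the loop
lemma pvLoopA_step (m c : Int) (s : PySem.Set Int) (h : c < m) :
    pvLoopA m c s = pvLoopA m (c + 1)
      (if PySem.Int.mod c 7 == 0 || PySem.Int.mod c 2 == 0 then PySem.Set.add s c else s) := by
  rw [pvLoopA, if_pos h]

-- every element the loop puts into the set is < input_max (or was already in s)
lemma pvLoopA_mem (input_max counter : Int) (s : PySem.Set Int) (x : Int)
    (hx : x ∈ pvLoopA input_max counter s) : x ∈ s ∨ x < input_max := by
  revert hx
  induction counter, s using pvLoopA.induct input_max with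
  | case1 c s hc ih =>
    intro hx
    rw [pvLoopA, if_pos hc] at hx
    rcases ih hx with h | h
    · split at h
      · rcases (PySem.Set.mem_add s c x).1 h with h' | h'
        · exact Or.inl h'
        · exact Or.inr (by omega)
      · exact Or.inl h
    · exact Or.inr h
  | case2 c s hc =>
    intro hx
    rw [pvLoopA, if_neg hc] at hx
    exact Or.inl hx

-- loop from counter ≥ input_max produces s
lemma pvLoopA_base (input_max counter : Int) (s : PySem.Set Int) (h : ¬ counter < input_max) :
    pvLoopA input_max counter s = s := by
  rw [pvLoopA, if_neg h]

-- peel the LAST iteration off the loop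
lemma pvLoopA_peel (input_max counter : Int) (s : PySem.Set Int) (h : counter < input_max) :
    pvLoopA input_max counter s =
      (if PySem.Int.mod (input_max - 1) 7 == 0 || PySem.Int.mod (input_max - 1) 2 == 0
       then PySem.Set.add (pvLoopA (input_max - 1) counter s) (input_max - 1)
       else pvLoopA (input_max - 1) counter s) := by
  revert h
  induction counter, s using pvLoopA.induct input_max with
  | case1 c s hc ih =>
    intro h
    simp only [dite_eq_ite] at ih
    by_cases h2 : c + 1 < input_max
    · have hcm : c < input_max - 1 := by omega
      rw [pvLoopA_step input_max c s hc, ih h2, pvLoopA_step (input_max - 1) c s hcm]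
    · -- c = input_max - 1 : last iteration
      have hce : c = input_max - 1 := by omega
      rw [pvLoopA_step input_max c s hc,
        pvLoopA_base input_max (c + 1) _ (by omega),
        pvLoopA_base (input_max - 1) c s (by omega), hce]
  | case2 c s hc => intro h; omega

-- length and sum of adding a fresh element
lemma set_add_stats (s : PySem.Set Int) (x : Int) (hx : x ∉ s) :
    (PySem.Set.add s x).length = s.length + 1 ∧ (PySem.Set.add s x).sum = s.sum + x := by
  have : PySem.Set.add s x = s ++ [x] := by
    unfold PySem.Set.add
    rw [if_neg]
    simp only [PySem.Set.contains_eq_listContains]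
    simpa using hx
  simp [this]

-- triangular-sum step, shared by d = 2, 7, 14
lemma sum_step_core (d m k k' : Int)
    (hdvd : d ∣ m → k * d = m ∧ k = k' + 1) (hnd : ¬ d ∣ m → k = k') :
    (d * k * (k + 1)) / 2 = (d * k' * (k' + 1)) / 2 + (if d ∣ m then m else 0) := by
  by_cases h : d ∣ m
  · obtain ⟨h1, h2⟩ := hdvd h
    obtain ⟨t, ht⟩ := Int.even_mul_succ_self k'
    subst h2
    have e1 : d * (k' + 1) * (k' + 1 + 1) = 2 * (d * t + d * (k' + 1)) := by
      linear_combination d * ht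
    have e2 : d * k' * (k' + 1) = 2 * (d * t) := by linear_combination d * ht
    rw [if_pos h, e1, e2, Int.mul_ediv_cancel_left _ two_ne_zero,
        Int.mul_ediv_cancel_left _ two_ne_zero]
    linarith [h1]
  · rw [hnd h, if_neg h]; omega

-- inclusion-exclusion count step
lemma count_step (m : Int) :
    m / 2 + m / 7 - m / 14 =
      (m - 1) / 2 + (m - 1) / 7 - (m - 1) / 14 + (if (7:Int) ∣ m ∨ (2:Int) ∣ m then 1 else 0) := by
  have e2 : m / 2 = (m - 1) / 2 + (if (2:Int) ∣ m then 1 else 0) := by split_ifs <;> omega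
  have e7 : m / 7 = (m - 1) / 7 + (if (7:Int) ∣ m then 1 else 0) := by split_ifs <;> omega
  have e14 : m / 14 = (m - 1) / 14 + (if (14:Int) ∣ m then 1 else 0) := by split_ifs <;> omega
  rw [e2, e7, e14]
  clear e2 e7 e14
  split_ifs <;> omega

-- B's closed form written with ediv (floordiv on positive divisors)
def pvClosed (input_max : Int) : Int × Int :=
  let n := input_max - 1
  if n < 1 then (0, 0)
  else
    (n / 2 + n / 7 - n / 14,
     (2 * (n / 2) * (n / 2 + 1)) / 2 + (7 * (n / 7) * (n / 7 + 1)) / 2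
       - (14 * (n / 14) * (n / 14 + 1)) / 2)

lemma alt_eq_closed (input_max : Int) :
    calc_sum_and_count_all_numbers_div_by_2_or_7_alt input_max = pvClosed input_max := by
  unfold calc_sum_and_count_all_numbers_div_by_2_or_7_alt pvClosed
  simp only [PySem.Int.floordiv_eq_ediv_of_pos (by norm_num : (0:Int) < 2),
    PySem.Int.floordiv_eq_ediv_of_pos (by norm_num : (0:Int) < 7),
    PySem.Int.floordiv_eq_ediv_of_pos (by norm_num : (0:Int) < 14)]

-- the closed form satisfies the same step recurrence as the loop
lemma closed_step (m : Int) (hm : 1 ≤ m) :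
    pvClosed (m + 1) =
      (if PySem.Int.mod m 7 == 0 || PySem.Int.mod m 2 == 0
       then ((pvClosed m).1 + 1, (pvClosed m).2 + m)
       else pvClosed m) := by
  have h7 : PySem.Int.mod m 7 = m % 7 := PySem.Int.mod_eq_emod_of_pos (by norm_num)
  have h2 : PySem.Int.mod m 2 = m % 2 := PySem.Int.mod_eq_emod_of_pos (by norm_num)
  have hcond : (PySem.Int.mod m 7 == 0 || PySem.Int.mod m 2 == 0) = decide ((7:Int) ∣ m ∨ (2:Int) ∣ m) := by
    rw [h7, h2]
    by_cases d7 : (7:Int) ∣ m <;> by_cases d2 : (2:Int) ∣ m <;>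
      simp [d7, d2]
  have s2 := sum_step_core 2 m (m / 2) ((m - 1) / 2) (by omega) (by omega)
  have s7 := sum_step_core 7 m (m / 7) ((m - 1) / 7) (by omega) (by omega)
  have s14 := sum_step_core 14 m (m / 14) ((m - 1) / 14) (by omega) (by omega)
  rw [hcond]
  unfold pvClosed
  by_cases hbig : m < 2
  · -- m = 1
    have : m = 1 := by omega
    subst this
    norm_num
  · rw [if_neg (by omega : ¬ m + 1 - 1 < 1), if_neg (by omega : ¬ m - 1 < 1)]
    simp only [show m + 1 - 1 = m from by ring]
    by_cases hd : (7:Int) ∣ m ∨ (2:Int) ∣ m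
    · rw [if_pos (by simpa using hd)]
      rw [Prod.mk.injEq]
      refine ⟨?_, ?_⟩
      · rw [count_step m, if_pos hd]
      · rw [s2, s7, s14]
        clear s2 s7 s14 hcond h7 h2 hbig
        rcases hd with hd | hd <;> split_ifs <;> omega
    · rw [if_neg (by simpa using hd)]
      rw [Prod.mk.injEq]
      refine ⟨?_, ?_⟩
      · rw [count_step m, if_neg hd]
        omega
      · rw [s2, s7, s14]
        clear s2 s7 s14 hcond h7 h2 hbig
        push Not at hd
        obtain ⟨hd7, hd2⟩ := hd
        split_ifs <;> omega

-- A's value as (len, sum) of the loop's set, related to the closed form by induction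
lemma loop_stats (m : Int) (hm : 1 ≤ m) :
    ((pvLoopA m 1 PySem.Set.empty).length : Int) = (pvClosed m).1 ∧
    (pvLoopA m 1 PySem.Set.empty).sum = (pvClosed m).2 := by
  induction m, hm using Int.le_induction with
  | base =>
    rw [pvLoopA_base 1 1 _ (by omega)]
    unfold pvClosed
    norm_num [PySem.Set.empty]
  | succ m hm1 ih =>
    obtain ⟨ih1, ih2⟩ := ih
    rw [pvLoopA_peel (m + 1) 1 PySem.Set.empty (by omega)]
    have hms : m + 1 - 1 = m := by ring
    rw [closed_step m hm1, hms]
    by_cases hcond : (PySem.Int.mod m 7 == 0 || PySem.Int.mod m 2 == 0) = true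
    · rw [if_pos hcond, if_pos hcond]
      have hfresh : m ∉ pvLoopA m 1 PySem.Set.empty := by
        intro hmem
        rcases pvLoopA_mem m 1 _ m hmem with h | h
        · simp [PySem.Set.empty] at h
        · omega
      obtain ⟨hl, hs⟩ := set_add_stats (pvLoopA m 1 PySem.Set.empty) m hfresh
      constructor
      · rw [hl]; push_cast; omega
      · rw [hs, ih2]
    · rw [if_neg hcond, if_neg hcond]
      exact ⟨ih1, ih2⟩

-- ===== VERDICT (by name: the statement is the Claim_ definition above) =====
theorem calc_sum_and_count_all_numbers_div_by_2_or_7_spec : Claim_equal_calc_sum_and_count_all_numbers_div_by_2_or_7 := by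
  intro input_max _
  unfold Spec_calc_sum_and_count_all_numbers_div_by_2_or_7
  rw [alt_eq_closed]
  unfold calc_sum_and_count_all_numbers_div_by_2_or_7
  by_cases h : input_max ≤ 1
  · rw [pvLoopA_base input_max 1 _ (by omega)]
    unfold pvClosed
    rw [if_pos (by omega)]
    simp [PySem.Set.empty, PySem.Set.len]
  · obtain ⟨h1, h2⟩ := loop_stats input_max (by omega)
    simp only [PySem.Set.len]
    exact Prod.ext (by simpa using h1) h2
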